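-- pv_equiv track=rewrite | github.com/kyanmahajan/NLP_project | AutomateIntersection.py | cluster_points
-- ===== SOURCE A (Python) =====
-- def cluster_points(intersections):
--     """Cluster close points to avoid duplicates due to thick lines."""
--     final_points = []
--     dist_sq = 36  # within 6px
--
--     for x1, y1 in intersections:
--         is_new = True
--         for x2, y2 in final_points:
--             if (x1 - x2)**2 + (y1 - y2)**2 < dist_sq:
--                 is_new = False
--                 break
--         if is_new:
--             final_points.append((x1, y1))
--
--     return final_points
-- ===== SOURCE B (Python) =====
-- def cluster_points(intersections):
--     """Cluster close points via a spatial hash grid (cell size 6): only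
--     kept points in the 3x3 neighboring cells can be within 6px."""
--     grid = {}
--     final_points = []
--     for x, y in intersections:
--         cx, cy = x // 6, y // 6
--         if not any((x - px) ** 2 + (y - py) ** 2 < 36
--                    for dx in (-1, 0, 1)
--                    for dy in (-1, 0, 1)
--                    for px, py in grid.get((cx + dx, cy + dy), ())):
--             final_points.append((x, y))
--             grid.setdefault((cx, cy), []).append((x, y))
--     return final_points
-- ===== Notes on version B (the rewrite author's own statement) =====
-- stated objective: faster
-- what changed: Replaced the linear scan over all kept points by a spatial hash grid with cell size 6, so each new point is only compared against kept points in the 3x3 neighboring cells.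
import Mathlib
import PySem

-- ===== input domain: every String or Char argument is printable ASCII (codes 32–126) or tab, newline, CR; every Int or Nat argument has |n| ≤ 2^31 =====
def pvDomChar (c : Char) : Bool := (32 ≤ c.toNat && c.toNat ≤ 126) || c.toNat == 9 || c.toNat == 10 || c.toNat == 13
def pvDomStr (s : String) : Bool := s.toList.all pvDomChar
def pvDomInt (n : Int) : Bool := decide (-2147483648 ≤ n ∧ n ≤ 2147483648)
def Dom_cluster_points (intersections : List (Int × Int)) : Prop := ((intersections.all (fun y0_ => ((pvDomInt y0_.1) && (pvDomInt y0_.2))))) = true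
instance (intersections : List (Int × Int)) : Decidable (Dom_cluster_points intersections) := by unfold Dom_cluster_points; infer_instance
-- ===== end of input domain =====

-- B replaces A's scan of all kept points by a spatial hash grid (cell size 6),
-- checking only the 3x3 neighboring cells (faster, same return value).

-- ===== PORT A =====
def cluster_points (intersections : List (Int × Int)) : List (Int × Int) :=
  intersections.foldl (fun final_points p =>
    -- inner loop with break ≡ any over final_points
    if final_points.any (fun q => decide ((p.1 - q.1)^2 + (p.2 - q.2)^2 < 36))
    then final_points
    else final_points ++ [p]) []

-- ===== PORT B =====
def pvCell (p : Int × Int) : Int × Int :=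
  (PySem.Int.floordiv p.1 6, PySem.Int.floordiv p.2 6)

def pvClose (p q : Int × Int) : Bool :=
  decide ((p.1 - q.1)^2 + (p.2 - q.2)^2 < 36)

-- the 9 neighbor cells (cx+dx, cy+dy) for dx, dy in (-1, 0, 1)
def pvNbhd (c : Int × Int) : List (Int × Int) :=
  ([-1, 0, 1] : List Int).flatMap (fun dx =>
    ([-1, 0, 1] : List Int).map (fun dy => (c.1 + dx, c.2 + dy)))

def pvStepB (st : PySem.Dict (Int × Int) (List (Int × Int)) × List (Int × Int))
    (p : Int × Int) : PySem.Dict (Int × Int) (List (Int × Int)) × List (Int × Int) :=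
  let c := pvCell p
  if (pvNbhd c).any (fun nc => (st.1.getD nc []).any (fun q => pvClose p q))
  then st
  else (st.1.insert c (st.1.getD c [] ++ [p]), st.2 ++ [p])

def cluster_points_alt (intersections : List (Int × Int)) : List (Int × Int) :=
  (intersections.foldl pvStepB (PySem.Dict.empty, [])).2

-- ===== PRECONDITION & SPEC =====
def Spec_cluster_points (intersections : List (Int × Int)) (out : List (Int × Int)) : Prop := out = cluster_points_alt intersections
instance (intersections : List (Int × Int)) (out : List (Int × Int)) : Decidable (Spec_cluster_points intersections out) := by unfold Spec_cluster_points; infer_instance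

-- ===== CLAIM (what is proved, stated in full; the proofs are below) =====
def Claim_equal_cluster_points : Prop := ∀ (intersections : List (Int × Int)), Dom_cluster_points intersections → Spec_cluster_points intersections (cluster_points intersections)

-- ===== LEMMAS AND PROOFS =====

-- grid/out invariant: the grid holds exactly the kept points, each at its own cell
def pvInv (grid : PySem.Dict (Int × Int) (List (Int × Int))) (out : List (Int × Int)) : Prop :=
  (∀ q ∈ out, q ∈ grid.getD (pvCell q) []) ∧
  (∀ c q, q ∈ grid.getD c [] → q ∈ out ∧ pvCell q = c)

-- close points land in neighboring cells
lemma pvClose_cell_mem (p q : Int × Int) (h : pvClose p q = true) :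
    pvCell q ∈ pvNbhd (pvCell p) := by
  simp only [pvClose, decide_eq_true_eq] at h
  have hx2 : (p.1 - q.1)^2 < 36 := by nlinarith [sq_nonneg (p.2 - q.2)]
  have hy2 : (p.2 - q.2)^2 < 36 := by nlinarith [sq_nonneg (p.1 - q.1)]
  have hx : -5 ≤ p.1 - q.1 ∧ p.1 - q.1 ≤ 5 := by
    constructor <;> nlinarith
  have hy : -5 ≤ p.2 - q.2 ∧ p.2 - q.2 ≤ 5 := by
    constructor <;> nlinarith
  have e1 : PySem.Int.floordiv q.1 6 = q.1 / 6 := PySem.Int.floordiv_eq_ediv_of_pos (by omega)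
  have e2 : PySem.Int.floordiv q.2 6 = q.2 / 6 := PySem.Int.floordiv_eq_ediv_of_pos (by omega)
  have e3 : PySem.Int.floordiv p.1 6 = p.1 / 6 := PySem.Int.floordiv_eq_ediv_of_pos (by omega)
  have e4 : PySem.Int.floordiv p.2 6 = p.2 / 6 := PySem.Int.floordiv_eq_ediv_of_pos (by omega)
  simp only [pvCell, pvNbhd, List.mem_flatMap, List.mem_map, e1, e2, e3, e4]
  have h1 : q.1 / 6 = p.1 / 6 - 1 ∨ q.1 / 6 = p.1 / 6 ∨ q.1 / 6 = p.1 / 6 + 1 := by omega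
  have h2 : q.2 / 6 = p.2 / 6 - 1 ∨ q.2 / 6 = p.2 / 6 ∨ q.2 / 6 = p.2 / 6 + 1 := by omega
  rcases h1 with h1 | h1 | h1 <;> rcases h2 with h2 | h2 | h2
  · exact ⟨-1, by simp, -1, by simp, by simp only [Prod.mk.injEq]; omega⟩
  · exact ⟨-1, by simp, 0, by simp, by simp only [Prod.mk.injEq]; omega⟩
  · exact ⟨-1, by simp, 1, by simp, by simp only [Prod.mk.injEq]; omega⟩
  · exact ⟨0, by simp, -1, by simp, by simp only [Prod.mk.injEq]; omega⟩
  · exact ⟨0, by simp, 0, by simp, by simp only [Prod.mk.injEq]; omega⟩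
  · exact ⟨0, by simp, 1, by simp, by simp only [Prod.mk.injEq]; omega⟩
  · exact ⟨1, by simp, -1, by simp, by simp only [Prod.mk.injEq]; omega⟩
  · exact ⟨1, by simp, 0, by simp, by simp only [Prod.mk.injEq]; omega⟩
  · exact ⟨1, by simp, 1, by simp, by simp only [Prod.mk.injEq]; omega⟩

-- under the invariant, B's 9-cell test equals A's full-list test
lemma pvTest_eq (grid : PySem.Dict (Int × Int) (List (Int × Int))) (out : List (Int × Int))
    (hInv : pvInv grid out) (p : Int × Int) :
    (pvNbhd (pvCell p)).any (fun nc => (grid.getD nc []).any (fun q => pvClose p q)) =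
    out.any (fun q => pvClose p q) := by
  obtain ⟨h1, h2⟩ := hInv
  by_cases h : out.any (fun q => pvClose p q) = true
  · rw [h]
    rw [List.any_eq_true] at h
    obtain ⟨q, hq, hcl⟩ := h
    rw [List.any_eq_true]
    exact ⟨pvCell q, pvClose_cell_mem p q hcl, List.any_eq_true.mpr ⟨q, h1 q hq, hcl⟩⟩
  · rw [Bool.eq_false_iff.mpr h]
    rw [Bool.eq_false_iff]
    intro hB
    apply h
    rw [List.any_eq_true] at hB
    obtain ⟨nc, _, hany⟩ := hB
    rw [List.any_eq_true] at hany ⊢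
    obtain ⟨q, hqmem, hcl⟩ := hany
    exact ⟨q, (h2 nc q hqmem).1, hcl⟩

-- the invariant is preserved when a new point is kept
lemma pvInv_step (grid : PySem.Dict (Int × Int) (List (Int × Int))) (out : List (Int × Int))
    (hInv : pvInv grid out) (p : Int × Int) :
    pvInv (grid.insert (pvCell p) (grid.getD (pvCell p) [] ++ [p])) (out ++ [p]) := by
  obtain ⟨h1, h2⟩ := hInv
  constructor
  · intro q hq
    rw [List.mem_append] at hq
    rcases hq with hq | hq
    · rw [PySem.Dict.getD_insert]
      by_cases hc : pvCell q = pvCell p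
      · rw [if_pos hc]
        exact List.mem_append_left _ (hc ▸ h1 q hq)
      · rw [if_neg hc]; exact h1 q hq
    · simp only [List.mem_singleton] at hq
      subst hq
      rw [PySem.Dict.getD_insert, if_pos rfl]
      exact List.mem_append_right _ (List.mem_singleton.mpr rfl)
  · intro c q hq
    rw [PySem.Dict.getD_insert] at hq
    by_cases hc : c = pvCell p
    · rw [if_pos hc] at hq
      rw [List.mem_append] at hq
      rcases hq with hq | hq
      · obtain ⟨ho, hcell⟩ := h2 (pvCell p) q hq
        exact ⟨List.mem_append_left _ ho, hc ▸ hcell⟩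
      · simp only [List.mem_singleton] at hq
        subst hq
        exact ⟨List.mem_append_right _ (List.mem_singleton.mpr rfl), hc.symm⟩
    · rw [if_neg hc] at hq
      obtain ⟨ho, hcell⟩ := h2 c q hq
      exact ⟨List.mem_append_left _ ho, hcell⟩

-- main loop correspondence
lemma pvLoop_eq (l : List (Int × Int)) :
    ∀ (grid : PySem.Dict (Int × Int) (List (Int × Int))) (out : List (Int × Int)),
    pvInv grid out →
    (l.foldl pvStepB (grid, out)).2 =
    l.foldl (fun final_points p =>
      if final_points.any (fun q => decide ((p.1 - q.1)^2 + (p.2 - q.2)^2 < 36))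
      then final_points else final_points ++ [p]) out := by
  induction l with
  | nil => intro grid out _; rfl
  | cons p l ih =>
    intro grid out hInv
    simp only [List.foldl_cons]
    have htest := pvTest_eq grid out hInv p
    by_cases h : out.any (fun q => pvClose p q) = true
    · have hB : (pvNbhd (pvCell p)).any
          (fun nc => (grid.getD nc []).any (fun q => pvClose p q)) = true := htest ▸ h
      have hA : out.any (fun q => decide ((p.1 - q.1)^2 + (p.2 - q.2)^2 < 36)) = true := h
      rw [show pvStepB (grid, out) p = (grid, out) by
            simp only [pvStepB]; rw [if_pos hB]]
      rw [if_pos hA]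
      exact ih grid out hInv
    · have hB : ¬ (pvNbhd (pvCell p)).any
          (fun nc => (grid.getD nc []).any (fun q => pvClose p q)) = true := htest ▸ h
      have hA : ¬ out.any (fun q => decide ((p.1 - q.1)^2 + (p.2 - q.2)^2 < 36)) = true := h
      rw [show pvStepB (grid, out) p =
            (grid.insert (pvCell p) (grid.getD (pvCell p) [] ++ [p]), out ++ [p]) by
            simp only [pvStepB]; rw [if_neg hB]]
      rw [if_neg hA]
      exact ih _ _ (pvInv_step grid out hInv p)

-- ===== VERDICT (by name: the statement is the Claim_ definition above) =====
theorem cluster_points_spec : Claim_equal_cluster_points := by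
  intro intersections _
  unfold Spec_cluster_points cluster_points cluster_points_alt
  refine (pvLoop_eq intersections PySem.Dict.empty [] ?_).symm
  constructor
  · intro q hq; cases hq
  · intro c q hq; simp [PySem.Dict.getD_empty] at hq
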